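-- pv_equiv track=rewrite | github.com/rodoufu/challenges | urionlinejudge/1556.py | gen_multi_words
-- ===== SOURCE A (Python) =====
-- def gen_multi_words(num, word, counts, idx=0):
-- 	if idx == len(num):
-- 		yield []
-- 	else:
-- 		if num[idx]:
-- 			for c in range(1, counts[idx] + 1):
-- 				value = [word[idx]] * c
-- 				for it in gen_multi_words(num, word, counts, idx + 1):
-- 					yield value + it
-- 		else:
-- 			for it in gen_multi_words(num, word, counts, idx + 1):
-- 				yield it
-- ===== SOURCE B (Python) =====
-- def gen_multi_words(num, word, counts, idx=0):
--     options = []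
--     for j in range(idx, len(num)):
--         if num[j]:
--             if counts[j] < 1:
--                 return  # an empty option set at j: the whole product is empty
--             options.append([[word[j]] * c for c in range(1, counts[j] + 1)])
--     results = [[]]
--     for opts in options:
--         results = [r + seg for r in results for seg in opts]
--     yield from results
-- ===== Notes on version B (the rewrite author's own statement) =====
-- stated objective: alternative
-- what changed: Replaces the lazy recursive generator with an eager two-phase pass: build a table of per-index option lists ([[word[j]]*c for c in 1..counts[j]]) for truthy num[j], returning early when an option set is empty, then fold a cartesian-product accumulation over the table, yielding the flattened combinations in the same order.
import Mathlib
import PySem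

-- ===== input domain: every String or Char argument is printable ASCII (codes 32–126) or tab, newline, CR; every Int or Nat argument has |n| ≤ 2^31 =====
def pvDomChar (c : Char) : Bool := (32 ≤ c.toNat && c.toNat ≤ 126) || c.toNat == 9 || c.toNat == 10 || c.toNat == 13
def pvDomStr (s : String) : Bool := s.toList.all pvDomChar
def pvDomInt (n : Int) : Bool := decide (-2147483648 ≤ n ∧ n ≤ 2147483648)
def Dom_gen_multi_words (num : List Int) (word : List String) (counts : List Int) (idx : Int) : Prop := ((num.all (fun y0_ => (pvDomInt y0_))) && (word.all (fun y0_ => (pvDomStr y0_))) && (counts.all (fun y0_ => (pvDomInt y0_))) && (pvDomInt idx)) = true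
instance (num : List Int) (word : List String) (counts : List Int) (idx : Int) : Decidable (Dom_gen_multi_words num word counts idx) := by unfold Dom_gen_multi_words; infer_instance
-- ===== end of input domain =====

-- B replaces A's lazy recursive generator by an eager option-table + cartesian-product fold (objective: alternative decomposition, same cost).


-- ===== PORT A =====
-- A's recursion on idx, made total with a fuel bound (fuel only guards termination; inside Pre_ it never runs out).
def genMultiWordsA (num : List Int) (word : List String) (counts : List Int) : Nat → Int → List (List String)
  | 0, _ => []
  | fuel+1, idx =>
    if idx = (num.length : Int) then [[]]
    else if PySem.List.pyGetD num idx 0 ≠ 0 then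
      (PySem.List.pyRange 1 (PySem.List.pyGetD counts idx 0 + 1) 1).flatMap
        (fun c => (genMultiWordsA num word counts fuel (idx + 1)).map
          (fun it => List.replicate c.toNat (PySem.List.pyGetD word idx "") ++ it))
    else genMultiWordsA num word counts fuel (idx + 1)

def gen_multi_words (num : List Int) (word : List String) (counts : List Int) (idx : Int) : List (List String) :=
  genMultiWordsA num word counts (((num.length : Int) - idx).toNat + 1) idx

-- ===== PORT B =====
def gen_multi_words_alt (num : List Int) (word : List String) (counts : List Int) (idx : Int) : List (List String) :=
  let options := (PySem.List.pyRange idx (num.length : Int) 1).foldl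
    (fun acc j => match acc with
      | none => none   -- already returned early: an empty option set was found
      | some acc =>
        if PySem.List.pyGetD num j 0 ≠ 0 then
          if PySem.List.pyGetD counts j 0 < 1 then none
          else some (acc ++ [(PySem.List.pyRange 1 (PySem.List.pyGetD counts j 0 + 1) 1).map
                               (fun c => List.replicate c.toNat (PySem.List.pyGetD word j ""))])
        else some acc) (some [])
  match options with
  | none => []
  | some options =>
      options.foldl (fun res opts => res.flatMap (fun r => opts.map (fun seg => r ++ seg))) [[]]

-- ===== PRECONDITION & SPEC =====
-- Pre_ holds exactly when A runs to completion: idx within [-len(num), len(num)], and every truthy index the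
-- recursion actually reaches has its counts entry (and its word entry when counts there is >= 1); a truthy index
-- lying after an earlier truthy index with counts < 1 is never reached (A's loop body runs zero times there).
def Pre_gen_multi_words (num : List Int) (word : List String) (counts : List Int) (idx : Int) : Prop :=
  -(num.length : Int) ≤ idx ∧ idx ≤ (num.length : Int) ∧
  ∀ j ∈ PySem.List.pyRange idx (num.length : Int) 1,
    PySem.List.pyGetD num j 0 ≠ 0 →
      (((-(counts.length : Int) ≤ j ∧ j < (counts.length : Int)) ∧
        (1 ≤ PySem.List.pyGetD counts j 0 → -(word.length : Int) ≤ j ∧ j < (word.length : Int))) ∨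
       (∃ k ∈ PySem.List.pyRange idx (num.length : Int) 1, k < j ∧
          PySem.List.pyGetD num k 0 ≠ 0 ∧
          -(counts.length : Int) ≤ k ∧ k < (counts.length : Int) ∧
          PySem.List.pyGetD counts k 0 < 1))
instance (num : List Int) (word : List String) (counts : List Int) (idx : Int) : Decidable (Pre_gen_multi_words num word counts idx) := by unfold Pre_gen_multi_words; infer_instance

def pvWitness_gen_multi_words : List Int × List String × List Int × Int := ([1, 0], ["a", "b"], [2, 1], 0)

def Spec_gen_multi_words (num : List Int) (word : List String) (counts : List Int) (idx : Int) (out : List (List String)) : Prop := out = gen_multi_words_alt num word counts idx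
instance (num : List Int) (word : List String) (counts : List Int) (idx : Int) (out : List (List String)) : Decidable (Spec_gen_multi_words num word counts idx out) := by unfold Spec_gen_multi_words; infer_instance

-- ===== CLAIM (what is proved, stated in full; the proofs are below) =====
def Claim_equal_gen_multi_words : Prop := ∀ (num : List Int) (word : List String) (counts : List Int) (idx : Int), Dom_gen_multi_words num word counts idx → Pre_gen_multi_words num word counts idx → Spec_gen_multi_words num word counts idx (gen_multi_words num word counts idx)

-- ===== LEMMAS AND PROOFS =====

-- the option list built at index j
def pvOpt (word : List String) (counts : List Int) (j : Int) : List (List String) :=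
  (PySem.List.pyRange 1 (PySem.List.pyGetD counts j 0 + 1) 1).map
    (fun c => List.replicate c.toNat (PySem.List.pyGetD word j ""))

-- accumulator-free form of the option-table pass (ignoring the early return)
def pvOptsList (num : List Int) (word : List String) (counts : List Int) : List Int → List (List (List String))
  | [] => []
  | j :: js =>
      (if PySem.List.pyGetD num j 0 ≠ 0 then [pvOpt word counts j] else []) ++ pvOptsList num word counts js

-- cartesian product of the option lists, leftmost slowest, segments concatenated
def pvCart : List (List (List String)) → List (List String)
  | [] => [[]]
  | o :: rest => o.flatMap (fun seg => (pvCart rest).map (fun r => seg ++ r))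

-- B's first fold: aborts (none) iff some truthy index has an empty option set, else collects pvOptsList
theorem pvOpts_fold (num : List Int) (word : List String) (counts : List Int) :
    ∀ (L : List Int) (acc : List (List (List String))),
      L.foldl (fun acc j => match acc with
        | none => none
        | some acc =>
          if PySem.List.pyGetD num j 0 ≠ 0 then
            if PySem.List.pyGetD counts j 0 < 1 then none
            else some (acc ++ [(PySem.List.pyRange 1 (PySem.List.pyGetD counts j 0 + 1) 1).map
                                 (fun c => List.replicate c.toNat (PySem.List.pyGetD word j ""))])
          else some acc) (some acc)
      = if (∃ j ∈ L, PySem.List.pyGetD num j 0 ≠ 0 ∧ PySem.List.pyGetD counts j 0 < 1) then none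
        else some (acc ++ pvOptsList num word counts L) := by
  intro L
  induction L with
  | nil => intro acc; simp [pvOptsList]
  | cons j js ih =>
      intro acc
      simp only [List.foldl_cons]
      by_cases ht : PySem.List.pyGetD num j 0 ≠ 0
      · by_cases hc : PySem.List.pyGetD counts j 0 < 1
        · have hnone : ∀ M : List Int, M.foldl (fun acc j => match acc with
            | none => none
            | some acc =>
              if PySem.List.pyGetD num j 0 ≠ 0 then
                if PySem.List.pyGetD counts j 0 < 1 then none
                else some (acc ++ [(PySem.List.pyRange 1 (PySem.List.pyGetD counts j 0 + 1) 1).map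
                                     (fun c => List.replicate c.toNat (PySem.List.pyGetD word j ""))])
              else some acc) none = none := by
            intro M; induction M with
            | nil => rfl
            | cons m ms ihm => simpa using ihm
          have hex : ∃ k ∈ j :: js, PySem.List.pyGetD num k 0 ≠ 0 ∧ PySem.List.pyGetD counts k 0 < 1 :=
            ⟨j, by simp, ht, hc⟩
          rw [if_pos hex]
          simpa [ht, hc] using hnone js
        · rw [if_pos ht, if_neg hc, ih]
          have hiff : (∃ k ∈ j :: js, PySem.List.pyGetD num k 0 ≠ 0 ∧ PySem.List.pyGetD counts k 0 < 1)
              ↔ (∃ k ∈ js, PySem.List.pyGetD num k 0 ≠ 0 ∧ PySem.List.pyGetD counts k 0 < 1) := by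
            constructor
            · rintro ⟨k, hk, h1, h2⟩
              rcases List.mem_cons.mp hk with rfl | hk'
              · exact absurd h2 hc
              · exact ⟨k, hk', h1, h2⟩
            · rintro ⟨k, hk, h1, h2⟩; exact ⟨k, List.mem_cons_of_mem _ hk, h1, h2⟩
          simp only [pvOptsList, if_pos ht, pvOpt]
          split_ifs with h1 h2 h2
          · rfl
          · exact absurd (hiff.mpr h1) h2
          · exact absurd (hiff.mp h2) h1
          · simp
      · rw [if_neg ht, ih]
        have hiff : (∃ k ∈ j :: js, PySem.List.pyGetD num k 0 ≠ 0 ∧ PySem.List.pyGetD counts k 0 < 1)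
            ↔ (∃ k ∈ js, PySem.List.pyGetD num k 0 ≠ 0 ∧ PySem.List.pyGetD counts k 0 < 1) := by
          constructor
          · rintro ⟨k, hk, h1, h2⟩
            rcases List.mem_cons.mp hk with rfl | hk'
            · exact absurd h1 ht
            · exact ⟨k, hk', h1, h2⟩
          · rintro ⟨k, hk, h1, h2⟩; exact ⟨k, List.mem_cons_of_mem _ hk, h1, h2⟩
        simp only [pvOptsList, if_neg ht]
        split_ifs with h1 h2 h2
        · rfl
        · exact absurd (hiff.mpr h1) h2
        · exact absurd (hiff.mp h2) h1
        · simp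

theorem pvCart_nil_mem : ∀ (opts : List (List (List String))), [] ∈ opts → pvCart opts = [] := by
  intro opts
  induction opts with
  | nil => intro h; cases h
  | cons o rest ih =>
      intro h
      rcases List.mem_cons.mp h with rfl | h'
      · simp [pvCart]
      · simp [pvCart, ih h']

theorem pvAbort_mem_nil (num : List Int) (word : List String) (counts : List Int) :
    ∀ (L : List Int), (∃ j ∈ L, PySem.List.pyGetD num j 0 ≠ 0 ∧ PySem.List.pyGetD counts j 0 < 1) →
      [] ∈ pvOptsList num word counts L := by
  intro L
  induction L with
  | nil => rintro ⟨j, hj, -⟩; cases hj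
  | cons j js ih =>
      rintro ⟨k, hk, h1, h2⟩
      rcases List.mem_cons.mp hk with rfl | hk'
      · have hopt : pvOpt word counts k = [] := by
          unfold pvOpt
          rw [PySem.List.pyRange_one_eq_nil (by omega)]
          rfl
        simp [pvOptsList, h1, hopt]
      · have := ih ⟨k, hk', h1, h2⟩
        simp [pvOptsList, this]

theorem pvFold_cart :
    ∀ (opts : List (List (List String))) (init : List (List String)),
      opts.foldl (fun res opts => res.flatMap (fun r => opts.map (fun seg => r ++ seg))) init
        = init.flatMap (fun r => (pvCart opts).map (fun s => r ++ s)) := by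
  intro opts
  induction opts with
  | nil => intro init; simp [pvCart]
  | cons o rest ih =>
      intro init
      simp only [List.foldl_cons, pvCart]
      rw [ih]
      simp [List.flatMap_assoc, List.flatMap_map, List.map_map, List.map_flatMap, Function.comp_def, List.append_assoc]

theorem pvAlt_eq_cart (num : List Int) (word : List String) (counts : List Int) (idx : Int) :
    gen_multi_words_alt num word counts idx
      = pvCart (pvOptsList num word counts (PySem.List.pyRange idx (num.length : Int) 1)) := by
  simp only [gen_multi_words_alt]
  rw [pvOpts_fold]
  by_cases h : ∃ j ∈ PySem.List.pyRange idx (num.length : Int) 1,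
      PySem.List.pyGetD num j 0 ≠ 0 ∧ PySem.List.pyGetD counts j 0 < 1
  · rw [if_pos h]
    exact (pvCart_nil_mem _ (pvAbort_mem_nil num word counts _ h)).symm
  · rw [if_neg h]
    simp only [List.nil_append]
    rw [pvFold_cart]
    simp

theorem pvA_eq_cart (num : List Int) (word : List String) (counts : List Int) :
    ∀ (fuel : Nat) (idx : Int), -(num.length : Int) ≤ idx → idx ≤ (num.length : Int) →
      ((num.length : Int) - idx).toNat < fuel →
      genMultiWordsA num word counts fuel idx
        = pvCart (pvOptsList num word counts (PySem.List.pyRange idx (num.length : Int) 1)) := by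
  intro fuel
  induction fuel with
  | zero => intro idx _ _ h; omega
  | succ fuel ih =>
      intro idx h1 h2 h3
      by_cases he : idx = (num.length : Int)
      · subst he
        simp [genMultiWordsA, PySem.List.pyRange_one_eq_nil le_rfl, pvOptsList, pvCart]
      · have hlt : idx < (num.length : Int) := lt_of_le_of_ne h2 he
        rw [PySem.List.pyRange_one_cons hlt]
        have hrec := ih (idx + 1) (by omega) (by omega) (by omega)
        simp only [genMultiWordsA, if_neg he, pvOptsList]
        split_ifs with h
        · simp only [List.singleton_append, pvCart, pvOpt]
          rw [hrec]
          simp [List.flatMap_map]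
        · simpa using hrec

-- ===== VERDICT (by name: the statement is the Claim_ definition above) =====
theorem gen_multi_words_spec : Claim_equal_gen_multi_words := by
  intro num word counts idx _ hpre
  unfold Spec_gen_multi_words
  rw [pvAlt_eq_cart]
  unfold gen_multi_words
  exact pvA_eq_cart num word counts _ idx hpre.1 hpre.2.1 (by omega)
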